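-- pv_equiv track=rewrite | github.com/Terry20161226/lottery-ai-system | backtest_v2.py | check_prize
-- ===== SOURCE A (Python) =====
-- def check_prize(bet_front, bet_back, draw_front, draw_back) -> tuple:
--     """检查中奖金额和奖级"""
--     # 确保是整数
--     bet_front = [int(n) if isinstance(n, str) else n for n in bet_front]
--     bet_back = [int(n) if isinstance(n, str) else n for n in bet_back]
--
--     match_front = len(set(bet_front) & set(draw_front))
--     match_back = len(set(bet_back) & set(draw_back))
--
--     # 奖级判断
--     if match_front == 5 and match_back == 2:
--         return 8000000, 1
--     elif match_front == 5 and match_back == 1: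
--         return 100000, 2
--     elif match_front == 5 and match_back == 0:
--         return 10000, 3
--     elif match_front == 4 and match_back >= 1:
--         return 300, 4
--     elif match_front >= 3 and match_back >= 1:
--         return 15, 5
--     elif match_front >= 2 and match_back >= 1:
--         return 5, 6
--     elif match_back == 2:
--         return 5, 6
--     return 0, 0
-- ===== SOURCE B (Python) =====
-- # Different algorithm: matches are counted by a sorted-merge two-pointer scan over
-- # the deduplicated lists (no set intersection), and the prize is found by scanning
-- # a data table of interval rules in order (no if/elif cascade).
--
-- _RULES = [
--     # (f_lo, f_hi, b_lo, b_hi, amount, tier); None = unbounded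
--     (5, 5, 2, 2, 8000000, 1),
--     (5, 5, 1, 1, 100000, 2),
--     (5, 5, 0, 0, 10000, 3),
--     (4, 4, 1, None, 300, 4),
--     (3, None, 1, None, 15, 5),
--     (2, None, 1, None, 5, 6),
--     (0, None, 2, 2, 5, 6),
-- ]
--
--
-- def _matches(bet, draw):
--     xs = sorted(set(bet))
--     ys = sorted(set(draw))
--     i = j = c = 0
--     while i < len(xs) and j < len(ys):
--         if xs[i] == ys[j]:
--             c += 1
--             i += 1
--             j += 1
--         elif xs[i] < ys[j]:
--             i += 1
--         else:
--             j += 1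
--     return c
--
--
-- def check_prize(bet_front, bet_back, draw_front, draw_back) -> tuple:
--     bet_front = [int(n) if isinstance(n, str) else n for n in bet_front]
--     bet_back = [int(n) if isinstance(n, str) else n for n in bet_back]
--     f = _matches(bet_front, draw_front)
--     b = _matches(bet_back, draw_back)
--     for f_lo, f_hi, b_lo, b_hi, amount, tier in _RULES:
--         if f_lo <= f and (f_hi is None or f <= f_hi) \
--                 and b_lo <= b and (b_hi is None or b <= b_hi):
--             return amount, tier
--     return 0, 0
-- ===== Notes on version B (the rewrite author's own statement) =====
-- stated objective: alternative
-- what changed: Match counts are computed by a sort-then-merge two-pointer scan over the deduplicated lists instead of hash-set intersection, and the prize is chosen by iterating over a data table of interval rules instead of an if/elif cascade.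
import Mathlib
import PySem

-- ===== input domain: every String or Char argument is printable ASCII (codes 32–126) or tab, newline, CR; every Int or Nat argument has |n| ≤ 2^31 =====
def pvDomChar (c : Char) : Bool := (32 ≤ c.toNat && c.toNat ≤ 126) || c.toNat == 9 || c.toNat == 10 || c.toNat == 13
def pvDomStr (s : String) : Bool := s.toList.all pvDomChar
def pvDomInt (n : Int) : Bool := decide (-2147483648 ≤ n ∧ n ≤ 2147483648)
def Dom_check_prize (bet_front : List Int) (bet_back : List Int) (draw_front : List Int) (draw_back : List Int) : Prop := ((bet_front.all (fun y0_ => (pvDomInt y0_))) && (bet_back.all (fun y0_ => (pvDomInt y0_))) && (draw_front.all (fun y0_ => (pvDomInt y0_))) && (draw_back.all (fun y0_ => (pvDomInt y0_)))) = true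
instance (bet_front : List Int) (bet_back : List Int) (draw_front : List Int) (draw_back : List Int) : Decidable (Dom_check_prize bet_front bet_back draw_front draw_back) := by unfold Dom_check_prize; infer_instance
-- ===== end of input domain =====

-- B counts matches by a sorted-merge two-pointer scan over the deduplicated lists
-- (instead of set intersection) and picks the prize by scanning a data table of
-- interval rules in order (instead of an if/elif cascade); objective: alternative.

-- ===== PORT A =====
-- (the `int(n) if isinstance(n, str)` normalization is the identity on List Int inputs)
def check_prize (bet_front : List Int) (bet_back : List Int) (draw_front : List Int) (draw_back : List Int) : Int × Int :=
  let match_front : Int := PySem.Set.len (PySem.Set.inter (PySem.Set.ofList bet_front) (PySem.Set.ofList draw_front))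
  let match_back : Int := PySem.Set.len (PySem.Set.inter (PySem.Set.ofList bet_back) (PySem.Set.ofList draw_back))
  if match_front = 5 ∧ match_back = 2 then (8000000, 1)
  else if match_front = 5 ∧ match_back = 1 then (100000, 2)
  else if match_front = 5 ∧ match_back = 0 then (10000, 3)
  else if match_front = 4 ∧ match_back ≥ 1 then (300, 4)
  else if match_front ≥ 3 ∧ match_back ≥ 1 then (15, 5)
  else if match_front ≥ 2 ∧ match_back ≥ 1 then (5, 6)
  else if match_back = 2 then (5, 6)
  else (0, 0)

-- ===== PORT B =====
-- Source B's `while i < len(xs) and j < len(ys)` two-pointer loop, ported as the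
-- structural recursion consuming the two sorted lists (same comparisons, same count).
def mergeCount : List Int → List Int → Int
  | [], _ => 0
  | _ :: _, [] => 0
  | x :: xs, y :: ys =>
    if x = y then mergeCount xs ys + 1
    else if x < y then mergeCount xs (y :: ys)
    else mergeCount (x :: xs) ys
termination_by xs ys => xs.length + ys.length

-- _matches(bet, draw): merge-count over sorted(set(bet)) and sorted(set(draw))
def matchCount (bet draw : List Int) : Int :=
  mergeCount (PySem.List.sorted (PySem.Set.ofList bet) (fun x => x) false)
             (PySem.List.sorted (PySem.Set.ofList draw) (fun x => x) false)

-- _RULES: (f_lo, f_hi, b_lo, b_hi, amount, tier); none = unbounded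
def RULES : List (Int × Option Int × Int × Option Int × Int × Int) :=
  [(5, some 5, 2, some 2, 8000000, 1),
   (5, some 5, 1, some 1, 100000, 2),
   (5, some 5, 0, some 0, 10000, 3),
   (4, some 4, 1, none, 300, 4),
   (3, none, 1, none, 15, 5),
   (2, none, 1, none, 5, 6),
   (0, none, 2, some 2, 5, 6)]

-- the `for … in _RULES: if …: return …` scan; falls through to (0, 0)
def scanRules (f b : Int) : List (Int × Option Int × Int × Option Int × Int × Int) → Int × Int
  | [] => (0, 0)
  | (f_lo, f_hi, b_lo, b_hi, amount, tier) :: rest =>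
    if decide (f_lo ≤ f) && f_hi.all (fun h => decide (f ≤ h))
        && decide (b_lo ≤ b) && b_hi.all (fun h => decide (b ≤ h))
    then (amount, tier)
    else scanRules f b rest

def check_prize_alt (bet_front : List Int) (bet_back : List Int) (draw_front : List Int) (draw_back : List Int) : Int × Int :=
  let f := matchCount bet_front draw_front
  let b := matchCount bet_back draw_back
  scanRules f b RULES

-- ===== PRECONDITION & SPEC =====
def Spec_check_prize (bet_front : List Int) (bet_back : List Int) (draw_front : List Int) (draw_back : List Int) (out : Int × Int) : Prop := out = check_prize_alt bet_front bet_back draw_front draw_back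
instance (bet_front : List Int) (bet_back : List Int) (draw_front : List Int) (draw_back : List Int) (out : Int × Int) : Decidable (Spec_check_prize bet_front bet_back draw_front draw_back out) := by unfold Spec_check_prize; infer_instance

-- ===== CLAIM (what is proved, stated in full; the proofs are below) =====
def Claim_equal_check_prize : Prop := ∀ (bet_front : List Int) (bet_back : List Int) (draw_front : List Int) (draw_back : List Int), Dom_check_prize bet_front bet_back draw_front draw_back → Spec_check_prize bet_front bet_back draw_front draw_back (check_prize bet_front bet_back draw_front draw_back)

-- ===== LEMMAS AND PROOFS =====

-- On strictly increasing lists the merge count is the number of elements of xs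
-- that occur in ys (the size of the intersection).
lemma mergeCount_eq_filter (xs ys : List Int)
    (hx : xs.Pairwise (· < ·)) (hy : ys.Pairwise (· < ·)) :
    mergeCount xs ys = ((xs.filter (fun x => ys.contains x)).length : Int) := by
  induction xs, ys using mergeCount.induct with
  | case1 ys => simp [mergeCount]
  | case2 x xs => simp [mergeCount]
  | case3 xs y ys ih =>
    rcases List.pairwise_cons.mp hx with ⟨hxall, hxtail⟩
    rcases List.pairwise_cons.mp hy with ⟨hyall, hytail⟩
    have hcongr : ∀ z ∈ xs, ((y :: ys).contains z) = (ys.contains z) := by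
      intro z hz
      have hne : y ≠ z := by have := hxall z hz; omega
      simp [hne.symm]
    rw [mergeCount, if_pos rfl]
    rw [List.filter_cons, if_pos (by simp : ((y :: ys).contains y) = true),
      List.filter_congr hcongr, List.length_cons, ih hxtail hytail]
    push_cast
    ring
  | case4 x xs y ys hne hlt ih =>
    rcases List.pairwise_cons.mp hx with ⟨hxall, hxtail⟩
    have hnotmem : ((y :: ys).contains x) = false := by
      rcases List.pairwise_cons.mp hy with ⟨hyall, _⟩
      simp only [List.contains_cons, Bool.or_eq_false_iff, beq_eq_false_iff_ne, ne_eq]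
      refine ⟨by omega, ?_⟩
      simp only [List.contains_eq_mem, decide_eq_false_iff_not]
      intro hm
      have := hyall x hm
      omega
    rw [mergeCount, if_neg hne, if_pos hlt]
    simp only [List.filter_cons, hnotmem, Bool.false_eq_true, if_false]
    exact ih hxtail hy
  | case5 x xs y ys hne hnlt ih =>
    rcases List.pairwise_cons.mp hy with ⟨hyall, hytail⟩
    rcases List.pairwise_cons.mp hx with ⟨hxall, _⟩
    have hcongr : ∀ z ∈ x :: xs, ((y :: ys).contains z) = (ys.contains z) := by
      intro z hz
      have hzy : y ≠ z := by
        rcases List.mem_cons.mp hz with h | h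
        · omega
        · have := hxall z h; omega
      simp [hzy.symm]
    rw [mergeCount, if_neg hne, if_neg hnlt]
    rw [List.filter_congr hcongr]
    exact ih hx hytail

-- Source B's merge count equals A's set-intersection size.
lemma matchCount_eq (bet draw : List Int) :
    matchCount bet draw =
      PySem.Set.len (PySem.Set.inter (PySem.Set.ofList bet) (PySem.Set.ofList draw)) := by
  unfold matchCount
  set s := PySem.Set.ofList bet with hs
  set t := PySem.Set.ofList draw with ht
  set xs := PySem.List.sorted s (fun x => x) false with hxs
  set ys := PySem.List.sorted t (fun x => x) false with hys
  have hx : xs.Pairwise (· < ·) := PySem.List.sorted_ofList_pairwise_lt bet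
  have hy : ys.Pairwise (· < ·) := PySem.List.sorted_ofList_pairwise_lt draw
  rw [mergeCount_eq_filter xs ys hx hy]
  have hmemeq : ∀ z : Int, (ys.contains z) = (t.contains z) := by
    intro z
    simp only [hys, PySem.Set.contains_eq_listContains, List.contains_eq_mem]
    exact decide_eq_decide.mpr (PySem.List.mem_sorted t (fun x => x) false z)
  have hfc : xs.filter (fun x => ys.contains x) = xs.filter (fun x => t.contains x) := by
    exact List.filter_congr (fun z _ => hmemeq z)
  rw [hfc]
  have hperm : (xs.filter (fun x => t.contains x)).Perm (s.filter (fun x => t.contains x)) :=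
    (PySem.List.sorted_perm s (fun x => x) false).filter _
  rw [hperm.length_eq]
  simp [PySem.Set.len, PySem.Set.inter, PySem.Set.contains]

lemma len_nonneg {α : Type} (s : PySem.Set α) : 0 ≤ PySem.Set.len s := by
  simp [PySem.Set.len]

-- The rule-table scan computes exactly A's cascade (for nonnegative counts).
lemma scanRules_eq (f b : Int) (hf : 0 ≤ f) (hb : 0 ≤ b) :
    scanRules f b RULES =
      (if f = 5 ∧ b = 2 then ((8000000 : Int), (1 : Int))
       else if f = 5 ∧ b = 1 then (100000, 2)
       else if f = 5 ∧ b = 0 then (10000, 3)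
       else if f = 4 ∧ b ≥ 1 then (300, 4)
       else if f ≥ 3 ∧ b ≥ 1 then (15, 5)
       else if f ≥ 2 ∧ b ≥ 1 then (5, 6)
       else if b = 2 then (5, 6)
       else (0, 0)) := by
  simp only [RULES, scanRules, Option.all_some, Option.all_none, Bool.and_true,
    Bool.and_eq_true, decide_eq_true_eq]
  split_ifs <;> first | rfl | omega

-- ===== VERDICT (by name: the statement is the Claim_ definition above) =====
theorem check_prize_spec : Claim_equal_check_prize := by
  intro bet_front bet_back draw_front draw_back _
  show _ = _
  unfold check_prize check_prize_alt
  simp only [matchCount_eq]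
  rw [scanRules_eq _ _ (len_nonneg _) (len_nonneg _)]
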